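-- pv_equiv track=rewrite | github.com/Ujimatsu-Chiya/Advent-of-Code-Python-Solution | 2018/18D5.py | _solve
-- ===== SOURCE A (Python) =====
-- def _solve(ls):
--     st = []
--     M = 32
--     for x in ls:
--         if len(st) > 0 and st[-1] == x ^ M:
--             st.pop()
--         else:
--             st.append(x)
--     return len(st)
-- ===== SOURCE B (Python) =====
-- def _solve(ls):
--     a = list(ls)
--     changed = True
--     while changed:
--         changed = False
--         out = []
--         i = 0
--         n = len(a)
--         while i < n:
--             if i + 1 < n and a[i] ^ 32 == a[i + 1]:
--                 i += 2
--                 changed = True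
--             else:
--                 out.append(a[i])
--                 i += 1
--         a = out
--     return len(a)
-- ===== Notes on version B (the rewrite author's own statement) =====
-- stated objective: alternative
-- what changed: Replaced the one-pass stack collapse by repeated left-to-right scans that delete every adjacent complementary pair (a[i] ^ 32 == a[i+1]) and rebuild the list, iterated to a fixed point; confluence of the reduction makes the final length identical.
import Mathlib
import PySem

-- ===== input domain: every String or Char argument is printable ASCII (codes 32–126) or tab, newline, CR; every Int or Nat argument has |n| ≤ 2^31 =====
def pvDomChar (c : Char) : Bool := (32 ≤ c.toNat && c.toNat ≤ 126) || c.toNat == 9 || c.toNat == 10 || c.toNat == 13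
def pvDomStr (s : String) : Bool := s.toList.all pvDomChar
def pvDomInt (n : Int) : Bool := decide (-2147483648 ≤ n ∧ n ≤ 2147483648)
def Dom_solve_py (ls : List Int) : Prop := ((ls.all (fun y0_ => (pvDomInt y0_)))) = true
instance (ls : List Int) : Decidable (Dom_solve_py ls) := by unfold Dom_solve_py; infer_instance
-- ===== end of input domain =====

-- B replaces A's single-pass stack by repeated pair-deletion scans iterated to a fixed point
-- (objective: alternative decomposition, not faster); the return values are proved equal.

-- ===== PORT A =====
-- one iteration of A's for-loop body: pop the top if it equals x ^ 32, else append x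
def solve_py_step (st : List Int) (x : Int) : List Int :=
  if 0 < st.length ∧ PySem.List.pyGet? st (-1) = some (PySem.Int.bxor x 32) then
    st.dropLast
  else
    st ++ [x]

def solve_py (ls : List Int) : Int :=
  ((ls.foldl solve_py_step []).length : Int)

-- ===== PORT B =====
-- one full scan of B's inner while-loop: returns (out, changed)
def onePassB : List Int → List Int × Bool
  | [] => ([], false)
  | [x] => ([x], false)
  | x :: y :: t =>
    if PySem.Int.bxor x 32 = y then ((onePassB t).1, true)
    else ((x :: (onePassB (y :: t)).1), (onePassB (y :: t)).2)

-- needed by loopB's termination: a scan that removed a pair strictly shortens the list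
theorem onePassB_len : ∀ a : List Int, (onePassB a).1.length ≤ a.length := by
  intro a
  induction a using onePassB.induct with
  | case1 => simp [onePassB]
  | case2 x => simp [onePassB]
  | case3 x t ih => simp only [onePassB]; simp; omega
  | case4 x y t h ih => simp only [onePassB, if_neg h]; simpa using ih

theorem onePassB_lt (a : List Int) (h : (onePassB a).2 = true) :
    (onePassB a).1.length < a.length := by
  induction a using onePassB.induct with
  | case1 => simp [onePassB] at h
  | case2 x => simp [onePassB] at h
  | case3 x t ih =>
      simp only [onePassB]
      have := onePassB_len t
      simp; omega
  | case4 x y t hc ih =>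
      simp only [onePassB, if_neg hc] at h ⊢
      have := ih h
      simp only [List.length_cons] at this ⊢
      omega

-- B's outer while-loop: rescan until no pair was removed
def loopB (a : List Int) : List Int :=
  let r := onePassB a
  if h : r.2 then loopB r.1 else r.1
termination_by a.length
decreasing_by exact onePassB_lt a h

def solve_py_alt (ls : List Int) : Int :=
  ((loopB ls).length : Int)

-- ===== PRECONDITION & SPEC =====
def Spec_solve_py (ls : List Int) (out : Int) : Prop := out = solve_py_alt ls
instance (ls : List Int) (out : Int) : Decidable (Spec_solve_py ls out) := by unfold Spec_solve_py; infer_instance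

-- ===== CLAIM (what is proved, stated in full; the proofs are below) =====
def Claim_equal_solve_py : Prop := ∀ (ls : List Int), Dom_solve_py ls → Spec_solve_py ls (solve_py ls)

-- ===== LEMMAS AND PROOFS =====

-- xor-by-32 is an involution
theorem bxor32_invol (a : Int) : PySem.Int.bxor (PySem.Int.bxor a 32) 32 = a := by
  unfold PySem.Int.bxor
  by_cases h : 0 ≤ a
  · simp [h]
  · simp only [h, if_false]
    simp
    omega

-- "these two may not stand next to each other" (no complementary adjacent pair)
def relB (a b : Int) : Prop := ¬ (PySem.Int.bxor a 32 = b)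

-- head-at-front version of A's stack step
def fH : List Int → Int → List Int
  | [], x => [x]
  | y :: t, x => if y = PySem.Int.bxor x 32 then t else x :: y :: t

theorem fH_nil (x : Int) : fH [] x = [x] := rfl

theorem fH_cons (y : Int) (t : List Int) (x : Int) :
    fH (y :: t) x = if y = PySem.Int.bxor x 32 then t else x :: y :: t := rfl

theorem loopB_eq (a : List Int) :
    loopB a = if (onePassB a).2 then loopB (onePassB a).1 else (onePassB a).1 := by
  rw [loopB]
  exact dite_eq_ite

theorem step_rev (s : List Int) (x : Int) :
    solve_py_step s x = (fH s.reverse x).reverse := by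
  induction s using List.reverseRecOn with
  | nil => simp [solve_py_step, fH, PySem.List.pyGet?]
  | append_singleton t y _ =>
      by_cases h : y = PySem.Int.bxor x 32
      · simp [solve_py_step, fH, PySem.List.pyGet?_neg_one, h]
      · simp [solve_py_step, fH, PySem.List.pyGet?_neg_one, h]

theorem foldl_rev (ls : List Int) : ∀ s : List Int,
    ls.foldl solve_py_step s = (ls.foldl fH s.reverse).reverse := by
  induction ls with
  | nil => intro s; simp
  | cons x t ih =>
      intro s
      simp only [List.foldl_cons]
      rw [ih, step_rev, List.reverse_reverse]

theorem fH_chain (s : List Int) (x : Int) (h : List.IsChain relB s) :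
    List.IsChain relB (fH s x) := by
  match s with
  | [] => exact List.isChain_singleton x
  | y :: t =>
      rw [fH_cons]
      split_ifs with hy
      · exact h.tail
      · exact List.isChain_cons_cons.mpr ⟨fun hxy => hy hxy.symm, h⟩

-- one scan of B does not change what A's machine computes (from an irreducible stack)
theorem op_foldl : ∀ (ls s : List Int), List.IsChain relB s →
    (onePassB ls).1.foldl fH s = ls.foldl fH s := by
  intro ls
  induction ls using onePassB.induct with
  | case1 => intro s _; simp [onePassB]
  | case2 x => intro s _; simp [onePassB]
  | case3 x t ih =>
      intro s hs
      have hyx : PySem.Int.bxor (PySem.Int.bxor x 32) 32 = x := bxor32_invol x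
      have key : fH (fH s x) (PySem.Int.bxor x 32) = s := by
        match s, hs with
        | [], _ => rw [fH_nil, fH_cons, if_pos hyx.symm]
        | z :: t', hs =>
            by_cases hz : z = PySem.Int.bxor x 32
            · subst hz
              rw [fH_cons, if_pos rfl]
              match t', hs with
              | [], _ => rw [fH_nil]
              | w :: t'', hs =>
                  have hzw : relB (PySem.Int.bxor x 32) w := (List.isChain_cons_cons.mp hs).1
                  have hwne : ¬ (w = PySem.Int.bxor (PySem.Int.bxor x 32) 32) := by
                    rw [hyx]
                    intro hw
                    exact hzw (by rw [hyx, hw])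
                  rw [fH_cons, if_neg hwne]
            · rw [fH_cons, if_neg hz, fH_cons, if_pos hyx.symm]
      simp only [onePassB, List.foldl_cons, key]
      exact ih s hs
  | case4 x y t hc ih =>
      intro s hs
      simp only [onePassB, if_neg hc, List.foldl_cons]
      exact ih (fH s x) (fH_chain s x hs)

-- a scan that removed nothing returned the list unchanged, and that list is irreducible
theorem op_false : ∀ a : List Int, (onePassB a).2 = false →
    (onePassB a).1 = a ∧ List.IsChain relB a := by
  intro a
  induction a using onePassB.induct with
  | case1 => intro _; exact ⟨rfl, List.IsChain.nil⟩
  | case2 x => intro _; exact ⟨rfl, List.isChain_singleton x⟩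
  | case3 x t ih => intro h; simp [onePassB] at h
  | case4 x y t hc ih =>
      intro h
      simp only [onePassB, if_neg hc] at h ⊢
      obtain ⟨h1, h2⟩ := ih h
      exact ⟨by rw [h1], List.isChain_cons_cons.mpr ⟨hc, h2⟩⟩

-- B's fixed-point loop preserves A's machine result and ends irreducible
theorem loop_props : ∀ a : List Int,
    (loopB a).foldl fH [] = a.foldl fH [] ∧ List.IsChain relB (loopB a) := by
  intro a
  induction a using loopB.induct with
  | case1 x r h ih =>
      rw [loopB_eq, if_pos (show (onePassB x).2 = true from h)]
      obtain ⟨ih1, ih2⟩ := ih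
      exact ⟨by rw [ih1, op_foldl x [] List.IsChain.nil], ih2⟩
  | case2 x r h =>
      rw [loopB_eq, if_neg (show ¬ (onePassB x).2 = true from h)]
      obtain ⟨h1, h2⟩ := op_false x (by
        have : ¬ (onePassB x).2 = true := h
        simpa using this)
      exact ⟨by rw [h1], by rw [h1]; exact h2⟩

-- running A's machine over an irreducible list from a compatible irreducible stack just stacks it up
theorem unwind : ∀ (p s : List Int), List.IsChain relB p → List.IsChain relB s →
    (∀ x z, p.head? = some x → s.head? = some z → ¬ (z = PySem.Int.bxor x 32)) →
    p.foldl fH s = p.reverse ++ s := by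
  intro p
  induction p with
  | nil => intro s _ _ _; simp
  | cons x t ih =>
      intro s hp hs hb
      have hstep : fH s x = x :: s := by
        match s, hb with
        | [], _ => rfl
        | z :: t', hb => rw [fH_cons, if_neg (hb x z rfl rfl)]
      have hchain : List.IsChain relB (x :: s) := by
        refine List.isChain_cons.mpr ⟨?_, hs⟩
        intro z hz hxz
        exact hb x z rfl (Option.mem_def.mp hz) hxz.symm
      have hbound : ∀ w z, t.head? = some w → (x :: s).head? = some z →
          ¬ (z = PySem.Int.bxor w 32) := by
        intro w z hw hz hxw
        simp only [List.head?_cons, Option.some_inj] at hz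
        subst hz
        rcases t with _ | ⟨w', t'⟩
        · simp at hw
        · simp only [List.head?_cons, Option.some_inj] at hw
          subst hw
          exact (List.isChain_cons_cons.mp hp).1 (by rw [hxw, bxor32_invol])
      simp only [List.foldl_cons, hstep]
      rw [ih (x :: s) hp.tail hchain hbound]
      simp

-- ===== VERDICT (by name: the statement is the Claim_ definition above) =====
theorem solve_py_spec : Claim_equal_solve_py := by
  intro ls _
  unfold Spec_solve_py solve_py solve_py_alt
  rw [foldl_rev ls []]
  obtain ⟨h1, h2⟩ := loop_props ls
  rw [List.reverse_nil, ← h1,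
    unwind (loopB ls) [] h2 List.IsChain.nil (by intro x z _ hz; simp at hz)]
  simp
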